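-- pv_equiv track=rewrite | github.com/gene-c2g/testy | mscgen.py | fix_pos_tags
-- ===== SOURCE A (Python) =====
-- def fix_pos_tags(pos_tags):
--     """
--     Fix XX being tagged as VB, and retag ('set', 'NN') to ('set', 'VB') when followed by ('to', 'TO').
--     """
--     # fix XX being tagged as VB
--     pos_tags = [(word, 'NN') if word == 'XX' else (word, tag) for word, tag in pos_tags]
--     # If ('set', 'NN') is followed by ('to', 'TO'), change 'set' to ('set', 'VB')
--     new_pos_tags = []
--     i = 0
--     while i < len(pos_tags):
--         word, tag = pos_tags[i]
--         if (
--             word == 'set' and tag == 'NN' and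
--             i + 1 < len(pos_tags) and pos_tags[i + 1][0] == 'to' and pos_tags[i + 1][1] == 'TO'
--         ):
--             new_pos_tags.append(('set', 'VB'))
--         else:
--             new_pos_tags.append((word, tag))
--         i += 1
--     return new_pos_tags
-- ===== SOURCE B (Python) =====
-- def fix_pos_tags(pos_tags):
--     """
--     Fix XX being tagged as VB, and retag ('set', 'NN') to ('set', 'VB') when followed by ('to', 'TO').
--     """
--     out = []
--     nxt = None  # the original (word, tag) pair that follows the current one
--     for word, tag in reversed(pos_tags):
--         base = 'NN' if word == 'XX' else tag
--         if word == 'set' and base == 'NN' and nxt == ('to', 'TO'):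
--             out.append(('set', 'VB'))
--         else:
--             out.append((word, base))
--         nxt = (word, tag)
--     out.reverse()
--     return out
-- ===== Notes on version B (the rewrite author's own statement) =====
-- stated objective: alternative
-- what changed: Replaces A's two forward passes (a retagging comprehension, then an index-based while loop with length checks and subscript lookahead) by one backward traversal that carries the previously seen original pair as the lookahead and reverses the accumulated output once.
import Mathlib
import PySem

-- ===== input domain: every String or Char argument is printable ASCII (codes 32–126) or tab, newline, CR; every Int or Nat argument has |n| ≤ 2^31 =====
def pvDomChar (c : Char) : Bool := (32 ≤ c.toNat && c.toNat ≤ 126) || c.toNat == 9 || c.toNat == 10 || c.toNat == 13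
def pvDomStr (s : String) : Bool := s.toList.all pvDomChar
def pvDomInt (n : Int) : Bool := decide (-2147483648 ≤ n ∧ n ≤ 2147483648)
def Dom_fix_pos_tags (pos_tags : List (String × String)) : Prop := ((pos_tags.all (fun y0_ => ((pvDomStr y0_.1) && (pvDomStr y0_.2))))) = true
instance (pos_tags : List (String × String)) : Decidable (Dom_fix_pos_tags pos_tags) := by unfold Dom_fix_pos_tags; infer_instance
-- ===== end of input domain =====

-- B replaces A's two forward passes (retag comprehension + index-while with lookahead)
-- by one backward traversal carrying the next original pair; objective: alternative, same O(n) cost.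


-- ===== PORT A =====
-- A's while loop: index i over the mapped list, O(1) subscript lookahead at i+1.
def fixLoopA (ts : List (String × String)) (i : Nat) (acc : List (String × String)) :
    List (String × String) :=
  if h : i < ts.length then
    if ts[i].1 = "set" ∧ ts[i].2 = "NN" ∧ i + 1 < ts.length ∧
        (ts.getD (i + 1) ("", "")).1 = "to" ∧ (ts.getD (i + 1) ("", "")).2 = "TO" then
      fixLoopA ts (i + 1) (acc ++ [("set", "VB")])
    else
      fixLoopA ts (i + 1) (acc ++ [ts[i]])
  else acc
termination_by ts.length - i

def fix_pos_tags (pos_tags : List (String × String)) : List (String × String) :=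
  let ts := pos_tags.map (fun wt => if wt.1 = "XX" then (wt.1, "NN") else wt)
  fixLoopA ts 0 []

-- ===== PORT B =====
-- B: one backward pass; the state carries the output-so-far (in backward order) and the
-- original pair seen previously (= the pair following the current one), then one reverse.
def fixRevStep (st : List (String × String) × Option (String × String))
    (wt : String × String) : List (String × String) × Option (String × String) :=
  let base := if wt.1 = "XX" then "NN" else wt.2
  if wt.1 = "set" && base = "NN" && decide (st.2 = some ("to", "TO")) then
    (st.1 ++ [("set", "VB")], some wt)
  else
    (st.1 ++ [(wt.1, base)], some wt)

def fix_pos_tags_alt (pos_tags : List (String × String)) : List (String × String) :=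
  (pos_tags.reverse.foldl fixRevStep ([], none)).1.reverse

-- ===== PRECONDITION & SPEC =====
def Spec_fix_pos_tags (pos_tags : List (String × String)) (out : List (String × String)) : Prop := out = fix_pos_tags_alt pos_tags
instance (pos_tags : List (String × String)) (out : List (String × String)) : Decidable (Spec_fix_pos_tags pos_tags out) := by unfold Spec_fix_pos_tags; infer_instance

-- ===== CLAIM (what is proved, stated in full; the proofs are below) =====
def Claim_equal_fix_pos_tags : Prop := ∀ (pos_tags : List (String × String)), Dom_fix_pos_tags pos_tags → Spec_fix_pos_tags pos_tags (fix_pos_tags pos_tags)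

-- ===== LEMMAS AND PROOFS =====

-- Forward recursion forms used only by the proofs.
def fixLookTo : List (String × String) → Bool
  | (w2, t2) :: _ => w2 = "to" && t2 = "TO"
  | [] => false

def fixGoB : List (String × String) → List (String × String)
  | [] => []
  | (w, t) :: rest =>
    let base := if w = "XX" then "NN" else t
    if w = "set" && base = "NN" && fixLookTo rest then
      ("set", "VB") :: fixGoB rest
    else
      (w, base) :: fixGoB rest

-- Middle form: B's recursion shape applied to the already-mapped list.
def fixGoMid : List (String × String) → List (String × String)
  | [] => []
  | (w, t) :: rest =>
    if w = "set" && t = "NN" && fixLookTo rest then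
      ("set", "VB") :: fixGoMid rest
    else
      (w, t) :: fixGoMid rest

theorem fixGoMid_cons (p : String × String) (rest : List (String × String)) :
    fixGoMid (p :: rest) =
      if p.1 = "set" && p.2 = "NN" && fixLookTo rest then ("set", "VB") :: fixGoMid rest
      else p :: fixGoMid rest := by
  obtain ⟨w, t⟩ := p; rfl

theorem fixLoopA_eq_mid (ts : List (String × String)) (i : Nat) (acc : List (String × String)) :
    fixLoopA ts i acc = acc ++ fixGoMid (ts.drop i) := by
  by_cases h : i < ts.length
  · have hdrop : ts.drop i = ts[i] :: ts.drop (i + 1) := List.drop_eq_getElem_cons h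
    have ih := fixLoopA_eq_mid ts (i + 1) -- recursion on ts.length - i
    rw [fixLoopA, dif_pos h, hdrop, fixGoMid_cons]
    by_cases hnext : i + 1 < ts.length
    · have hdrop2 : ts.drop (i + 1) = ts[i + 1] :: ts.drop (i + 2) :=
        List.drop_eq_getElem_cons hnext
      have hgd : ts.getD (i + 1) ("", "") = ts[i + 1] := List.getD_eq_getElem _ _ hnext
      have hlook : fixLookTo (ts.drop (i + 1)) = (decide (ts[i + 1].1 = "to") && decide (ts[i + 1].2 = "TO")) := by
        rw [hdrop2]; obtain ⟨w2, t2⟩ := ts[i + 1]; simp [fixLookTo]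
      by_cases hc : ts[i].1 = "set" ∧ ts[i].2 = "NN" ∧ i + 1 < ts.length ∧
          (ts.getD (i + 1) ("", "")).1 = "to" ∧ (ts.getD (i + 1) ("", "")).2 = "TO"
      · obtain ⟨h1, h2, -, h4, h5⟩ := hc
        rw [hgd] at h4 h5
        rw [if_pos ⟨h1, h2, hnext, by rw [hgd]; exact h4, by rw [hgd]; exact h5⟩]
        rw [if_pos (by simp [h1, h2, hlook, h4, h5]), ih]
        simp
      · have hC' : ¬(ts[i].1 = "set" ∧ ts[i].2 = "NN" ∧ ts[i + 1].1 = "to" ∧ ts[i + 1].2 = "TO") := by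
          rw [hgd] at hc; tauto
        rw [if_neg hc]
        rw [if_neg (by rw [hlook]; simp only [Bool.and_eq_true, decide_eq_true_eq]; tauto), ih]
        simp
    · have hdrop2 : ts.drop (i + 1) = [] := List.drop_eq_nil_of_le (by omega)
      rw [if_neg (fun hc => absurd hc.2.2.1 hnext)]
      rw [if_neg (by simp [hdrop2, fixLookTo]), ih]
      simp
  · rw [fixLoopA, dif_neg h]
    have : ts.drop i = [] := List.drop_eq_nil_of_le (by omega)
    simp [this, fixGoMid]
termination_by ts.length - i

-- B on the raw list = middle form on the mapped list (the "to"/"TO" lookahead is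
-- unaffected by the map because "to" ≠ "XX").
theorem fixGoB_eq_mid (l : List (String × String)) :
    fixGoMid (l.map (fun wt => if wt.1 = "XX" then (wt.1, "NN") else wt)) = fixGoB l := by
  induction l with
  | nil => rfl
  | cons hd tl ih =>
    obtain ⟨w, t⟩ := hd
    rw [List.map_cons, fixGoMid.eq_def, fixGoB.eq_def]
    cases tl with
    | nil => by_cases hw : w = "XX" <;> simp_all [fixLookTo]
    | cons hd2 tl2 =>
      obtain ⟨w2, t2⟩ := hd2
      by_cases hw : w = "XX" <;> by_cases hw2 : w2 = "XX"
      · simp_all [fixLookTo]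
      · simp_all [fixLookTo]
      · simp_all [fixLookTo]
      · simp_all [fixLookTo]
        split_ifs with hcond
        · obtain ⟨-, h2, h3⟩ := hcond
          subst h2; subst h3
          rw [ih]
        · rfl

theorem fixLookTo_head? (tl : List (String × String)) :
    decide (tl.head? = some ("to", "TO")) = fixLookTo tl := by
  cases tl with
  | nil => simp [fixLookTo]
  | cons hd tl2 =>
    obtain ⟨w2, t2⟩ := hd
    simp [fixLookTo, Prod.ext_iff]

theorem fixGoB_cons (w t : String) (rest : List (String × String)) :
    fixGoB ((w, t) :: rest) =
      if w = "set" && (if w = "XX" then "NN" else t) = "NN" && fixLookTo rest then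
        ("set", "VB") :: fixGoB rest
      else (w, if w = "XX" then "NN" else t) :: fixGoB rest := rfl

theorem fixRev_foldl (l : List (String × String)) (acc0 : List (String × String)) :
    l.reverse.foldl fixRevStep (acc0, none) = (acc0 ++ (fixGoB l).reverse, l.head?) := by
  induction l generalizing acc0 with
  | nil => simp [fixGoB]
  | cons hd tl ih =>
    obtain ⟨w, t⟩ := hd
    rw [List.reverse_cons, List.foldl_append, ih acc0, List.foldl_cons, List.foldl_nil]
    rw [fixRevStep, fixGoB_cons]
    simp only [fixLookTo_head?]
    split_ifs <;> simp

theorem alt_eq_goB (l : List (String × String)) : fix_pos_tags_alt l = fixGoB l := by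
  unfold fix_pos_tags_alt
  rw [fixRev_foldl l []]
  simp

-- ===== VERDICT (by name: the statement is the Claim_ definition above) =====
theorem fix_pos_tags_spec : Claim_equal_fix_pos_tags := by
  intro pos_tags _
  unfold Spec_fix_pos_tags fix_pos_tags
  rw [fixLoopA_eq_mid, alt_eq_goB]
  simpa using fixGoB_eq_mid pos_tags
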